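-- pv_equiv track=rewrite | github.com/hushe123/FJSP | Critical.py | Get_Pre_Operation_Post_Index
-- ===== SOURCE A (Python) =====
-- def Get_Pre_Operation_Post_Index(Job_Chromosome,Job_Index,Job_Operator_Num):
--     Pre_Index = Index = Post_Index = -1
--     Num = 0
--     for i in range(len(Job_Chromosome)):
--             if Job_Chromosome[i] == Job_Index:
--                     Num += 1
--                     if Num == Job_Operator_Num - 1:
--                             Pre_Index = i
--                             continue
--                     if Num == Job_Operator_Num :
--                             Index = i
--                             continue
--                     if Num == Job_Operator_Num + 1:
--                             Post_Index = i
--                             continue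
--     return  Pre_Index, Index,Post_Index
-- ===== SOURCE B (Python) =====
-- def Get_Pre_Operation_Post_Index(Job_Chromosome, Job_Index, Job_Operator_Num):
--     positions = [i for i, v in enumerate(Job_Chromosome) if v == Job_Index]
--     def at_(k):
--         return positions[k] if 0 <= k < len(positions) else -1
--     return at_(Job_Operator_Num - 2), at_(Job_Operator_Num - 1), at_(Job_Operator_Num)
-- ===== Notes on version B (the rewrite author's own statement) =====
-- stated objective: simpler
-- what changed: Replaces the counter-and-branch chain inside the scan by building the list of positions of Job_Index once and returning three guarded direct lookups into it.
import Mathlib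
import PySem

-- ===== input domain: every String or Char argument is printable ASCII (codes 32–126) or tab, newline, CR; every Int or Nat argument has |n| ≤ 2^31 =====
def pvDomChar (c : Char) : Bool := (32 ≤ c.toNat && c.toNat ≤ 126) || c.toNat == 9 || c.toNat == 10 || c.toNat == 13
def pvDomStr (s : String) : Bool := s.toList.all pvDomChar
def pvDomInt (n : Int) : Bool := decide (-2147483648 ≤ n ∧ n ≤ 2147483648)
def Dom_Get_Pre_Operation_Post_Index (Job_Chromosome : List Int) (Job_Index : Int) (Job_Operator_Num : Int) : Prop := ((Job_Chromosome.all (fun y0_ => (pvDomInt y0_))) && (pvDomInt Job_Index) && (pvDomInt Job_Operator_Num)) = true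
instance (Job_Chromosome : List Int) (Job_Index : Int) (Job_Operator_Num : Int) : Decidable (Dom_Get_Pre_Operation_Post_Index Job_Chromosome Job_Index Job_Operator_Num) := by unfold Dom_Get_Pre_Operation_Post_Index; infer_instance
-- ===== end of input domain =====

-- B replaces A's counter-and-branch scan by a position table built once plus three guarded direct lookups (objective: simpler).


-- ===== PORT A =====
-- the for-loop of A: state (Pre_Index, Index, Post_Index, Num), i is the running position
def pvLoopA (JI JON : Int) : List Int → Nat → Int × Int × Int × Int → Int × Int × Int × Int
  | [], _, st => st
  | v :: rest, i, (pre, idx, post, num) =>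
    if v = JI then
      let num' := num + 1
      if num' = JON - 1 then pvLoopA JI JON rest (i+1) ((i : Int), idx, post, num')
      else if num' = JON then pvLoopA JI JON rest (i+1) (pre, (i : Int), post, num')
      else if num' = JON + 1 then pvLoopA JI JON rest (i+1) (pre, idx, (i : Int), num')
      else pvLoopA JI JON rest (i+1) (pre, idx, post, num')
    else pvLoopA JI JON rest (i+1) (pre, idx, post, num)

def Get_Pre_Operation_Post_Index (Job_Chromosome : List Int) (Job_Index : Int) (Job_Operator_Num : Int) : Int × Int × Int :=
  let s := pvLoopA Job_Index Job_Operator_Num Job_Chromosome 0 (-1, -1, -1, 0)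
  (s.1, s.2.1, s.2.2.1)

-- ===== PORT B =====
-- positions = [i for i, v in enumerate(xs) if v == JI], with i the running position
def pvPositions (JI : Int) : List Int → Nat → List Int
  | [], _ => []
  | v :: rest, i => if v = JI then (i : Int) :: pvPositions JI rest (i+1) else pvPositions JI rest (i+1)

-- at_(k): positions[k] if 0 <= k < len(positions) else -1
def pvAt (ps : List Int) (k : Int) : Int :=
  if 0 ≤ k ∧ k < (ps.length : Int) then ps.getD k.toNat (-1) else -1

def Get_Pre_Operation_Post_Index_alt (Job_Chromosome : List Int) (Job_Index : Int) (Job_Operator_Num : Int) : Int × Int × Int :=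
  let ps := pvPositions Job_Index Job_Chromosome 0
  (pvAt ps (Job_Operator_Num - 2), pvAt ps (Job_Operator_Num - 1), pvAt ps Job_Operator_Num)

-- ===== PRECONDITION & SPEC =====
def Spec_Get_Pre_Operation_Post_Index (Job_Chromosome : List Int) (Job_Index : Int) (Job_Operator_Num : Int) (out : Int × Int × Int) : Prop := out = Get_Pre_Operation_Post_Index_alt Job_Chromosome Job_Index Job_Operator_Num
instance (Job_Chromosome : List Int) (Job_Index : Int) (Job_Operator_Num : Int) (out : Int × Int × Int) : Decidable (Spec_Get_Pre_Operation_Post_Index Job_Chromosome Job_Index Job_Operator_Num out) := by unfold Spec_Get_Pre_Operation_Post_Index; infer_instance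

-- ===== CLAIM (what is proved, stated in full; the proofs are below) =====
def Claim_equal_Get_Pre_Operation_Post_Index : Prop := ∀ (Job_Chromosome : List Int) (Job_Index : Int) (Job_Operator_Num : Int), Dom_Get_Pre_Operation_Post_Index Job_Chromosome Job_Index Job_Operator_Num → Spec_Get_Pre_Operation_Post_Index Job_Chromosome Job_Index Job_Operator_Num (Get_Pre_Operation_Post_Index Job_Chromosome Job_Index Job_Operator_Num)

-- ===== LEMMAS AND PROOFS =====

-- what the loop does to one stored slot, as a function of the target count t
def pvUpd (ps : List Int) (num t old : Int) : Int :=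
  if num < t ∧ t ≤ num + (ps.length : Int) then ps.getD (t - num - 1).toNat (-1) else old

lemma pvUpd_cons (i : Nat) (ps : List Int) (num t old : Int) :
    pvUpd ((i : Int) :: ps) num t old = pvUpd ps (num + 1) t (if num + 1 = t then (i : Int) else old) := by
  unfold pvUpd
  by_cases ht : num + 1 = t
  · have h1 : num < t ∧ t ≤ num + (((i : Int) :: ps).length : Int) := by
      simp only [List.length_cons]; push_cast; omega
    have h2 : ¬ (num + 1 < t ∧ t ≤ num + 1 + (ps.length : Int)) := by omega
    rw [if_pos h1, if_neg h2, if_pos ht]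
    have : (t - num - 1).toNat = 0 := by omega
    simp [this]
  · rw [if_neg ht]
    by_cases h2 : num + 1 < t ∧ t ≤ num + 1 + (ps.length : Int)
    · have h1 : num < t ∧ t ≤ num + (((i : Int) :: ps).length : Int) := by
        simp only [List.length_cons]; push_cast; omega
      rw [if_pos h1, if_pos h2]
      have hk : (t - num - 1).toNat = (t - (num + 1) - 1).toNat + 1 := by omega
      simp [hk]
    · have h1 : ¬ (num < t ∧ t ≤ num + (((i : Int) :: ps).length : Int)) := by
        simp only [List.length_cons]; push_cast; omega
      rw [if_neg h1, if_neg h2]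

lemma pvLoopA_char (JI JON : Int) (xs : List Int) (i : Nat) (pre idx post num : Int) :
    pvLoopA JI JON xs i (pre, idx, post, num) =
      (pvUpd (pvPositions JI xs i) num (JON - 1) pre,
       pvUpd (pvPositions JI xs i) num JON idx,
       pvUpd (pvPositions JI xs i) num (JON + 1) post,
       num + ((pvPositions JI xs i).length : Int)) := by
  induction xs generalizing i pre idx post num with
  | nil => simp [pvLoopA, pvPositions, pvUpd]; omega
  | cons v rest ih =>
    by_cases hv : v = JI
    · simp only [pvLoopA, pvPositions, if_pos hv]
      have key : ∀ pre' idx' post',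
          pre' = (if num + 1 = JON - 1 then (i : Int) else pre) →
          idx' = (if num + 1 = JON then (i : Int) else idx) →
          post' = (if num + 1 = JON + 1 then (i : Int) else post) →
          pvLoopA JI JON rest (i+1) (pre', idx', post', num + 1) =
            (pvUpd ((i : Int) :: pvPositions JI rest (i+1)) num (JON - 1) pre,
             pvUpd ((i : Int) :: pvPositions JI rest (i+1)) num JON idx,
             pvUpd ((i : Int) :: pvPositions JI rest (i+1)) num (JON + 1) post,
             num + ((((i : Int) :: pvPositions JI rest (i+1))).length : Int)) := by
        intro pre' idx' post' h1 h2 h3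
        rw [ih, pvUpd_cons, pvUpd_cons, pvUpd_cons, ← h1, ← h2, ← h3]
        simp only [List.length_cons]
        push_cast
        congr 3
        omega
      split_ifs with hA hB hC
      · exact key _ _ _ (by rw [if_pos hA]) (by rw [if_neg (by omega)]) (by rw [if_neg (by omega)])
      · exact key _ _ _ (by rw [if_neg hA]) (by rw [if_pos hB]) (by rw [if_neg (by omega)])
      · exact key _ _ _ (by rw [if_neg hA]) (by rw [if_neg hB]) (by rw [if_pos hC])
      · exact key _ _ _ (by rw [if_neg hA]) (by rw [if_neg hB]) (by rw [if_neg hC])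
    · simp only [pvLoopA, pvPositions, if_neg hv]
      exact ih (i+1) pre idx post num

lemma pvUpd_zero_neg_one (ps : List Int) (t : Int) : pvUpd ps 0 t (-1) = pvAt ps (t - 1) := by
  unfold pvUpd pvAt
  have hk : t - 0 - 1 = t - 1 := by ring
  rw [hk]
  split_ifs with h1 h2 <;> first | rfl | omega

theorem Get_Pre_Operation_Post_Index_spec : Claim_equal_Get_Pre_Operation_Post_Index := by
  intro xs JI JON _
  unfold Spec_Get_Pre_Operation_Post_Index Get_Pre_Operation_Post_Index Get_Pre_Operation_Post_Index_alt
  rw [pvLoopA_char]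
  simp only [pvUpd_zero_neg_one]
  have h1 : JON - 1 - 1 = JON - 2 := by ring
  have h2 : JON + 1 - 1 = JON := by ring
  rw [h1, h2]
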